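-- pv_equiv track=rewrite | github.com/aorursy/KT_dataset_py | kiri8128_kernelc0abe2157c.py | NumList
-- ===== SOURCE A (Python) =====
-- def NumList(s):
--     s = str(s)
--     def trimNum(s):
--         ret = ""
--         for ss in s:
--             if ss in ['0', '1', '2', '3', '4', '5', '6', '7', '8', '9']:
--                 ret += ss
--         return ret
--     def chkNumeric(s):
--         t = trimNum(s)
--         if len(t) >= 1:
--             return 1
--         return 0
--     l = []
--     for ss in s.split():
--         if chkNumeric(ss):
--             l.append(trimNum(ss))
--     return l
-- ===== SOURCE B (Python) =====
-- def NumList(s):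
--     s = str(s)
--     out = []
--     buf = ""
--     for c in s + " ":
--         if c in " \t\n\r\x0b\x0c":
--             if buf:
--                 out.append(buf)
--             buf = ""
--         elif "0" <= c <= "9":
--             buf += c
--     return out
-- ===== Notes on version B (the rewrite author's own statement) =====
-- stated objective: faster
-- what changed: Replaces split() plus a per-token digit-filter pass (which scans each token twice, once in chkNumeric and again in trimNum, building strings by repeated concatenation) with a single character-by-character scan that maintains one digit buffer and flushes it at whitespace boundaries.
import Mathlib
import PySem

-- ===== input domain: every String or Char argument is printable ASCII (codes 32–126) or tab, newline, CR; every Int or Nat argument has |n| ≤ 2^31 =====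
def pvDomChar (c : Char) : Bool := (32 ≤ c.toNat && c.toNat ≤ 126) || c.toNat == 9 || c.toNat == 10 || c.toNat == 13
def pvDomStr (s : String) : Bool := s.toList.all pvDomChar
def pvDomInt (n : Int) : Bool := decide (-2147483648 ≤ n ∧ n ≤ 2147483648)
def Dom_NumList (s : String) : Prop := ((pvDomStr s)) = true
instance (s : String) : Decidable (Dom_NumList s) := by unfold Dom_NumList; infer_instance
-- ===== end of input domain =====

-- B replaces split() plus two per-token digit-filter passes by one character scan with a digit buffer (same O(n), fewer passes and no token list).

-- ===== PORT A =====
def pvDigits : List Char := ['0', '1', '2', '3', '4', '5', '6', '7', '8', '9']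

def trimNum (t : String) : String :=
  String.ofList (t.toList.foldl (fun ret ss => if ss ∈ pvDigits then ret ++ [ss] else ret) [])

def chkNumeric (t : String) : Int :=
  if PySem.Str.len (trimNum t) ≥ 1 then 1 else 0

def NumList (s : String) : List String :=
  (PySem.Str.split₀ s).foldl (fun l ss => if chkNumeric ss ≠ 0 then l ++ [trimNum ss] else l) []

-- ===== PORT B =====
def pvWs : List Char := [' ', '\t', '\n', '\r', '\x0b', '\x0c']

-- the loop body of Source B's single scan: flush buffer at whitespace, grow it at an ASCII digit
def pvStep (st : List String × List Char) (c : Char) : List String × List Char :=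
  if c ∈ pvWs then
    ((if st.2.isEmpty then st.1 else st.1 ++ [String.ofList st.2]), [])
  else if '0' ≤ c ∧ c ≤ '9' then (st.1, st.2 ++ [c])
  else st

def NumList_alt (s : String) : List String :=
  ((s.toList ++ [' ']).foldl pvStep ([], [])).1

-- ===== PRECONDITION & SPEC =====
def Spec_NumList (s : String) (out : List String) : Prop := out = NumList_alt s
instance (s : String) (out : List String) : Decidable (Spec_NumList s out) := by unfold Spec_NumList; infer_instance

-- ===== CLAIM (what is proved, stated in full; the proofs are below) =====
def Claim_equal_NumList : Prop := ∀ (s : String), Dom_NumList s → Spec_NumList s (NumList s)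

-- ===== LEMMAS AND PROOFS =====

def pvDig (c : Char) : Bool := decide ('0' ≤ c ∧ c ≤ '9')

-- reference tokenizer mirroring PySem.Chars.split₀.go without the reversed accumulator
def tokensRef : List Char → List Char → List (List Char)
  | [], cur => if cur.isEmpty then [] else [cur.reverse]
  | c :: rest, cur =>
      if PySem.Chars.isspace c then
        (if cur.isEmpty then tokensRef rest [] else cur.reverse :: tokensRef rest [])
      else tokensRef rest (c :: cur)

def emitTok (t : List Char) : List String :=
  if (t.filter pvDig).isEmpty then [] else [String.ofList (t.filter pvDig)]

lemma char_le_iff_toNat (c d : Char) : c ≤ d ↔ c.toNat ≤ d.toNat := by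
  rfl

lemma char_of_toNat {c : Char} {n : Nat} (h : c.toNat = n) : c = Char.ofNat n := by
  rw [← h, Char.ofNat_toNat]

lemma dig_iff (c : Char) : pvDig c = true ↔ c ∈ pvDigits := by
  constructor
  · intro h
    simp only [pvDig, decide_eq_true_eq] at h
    obtain ⟨h1, h2⟩ := h
    rw [char_le_iff_toNat] at h1 h2
    have e0 : ('0' : Char).toNat = 48 := rfl
    have e9 : ('9' : Char).toNat = 57 := rfl
    rw [e0] at h1; rw [e9] at h2
    have h10 : c.toNat = 48 ∨ c.toNat = 49 ∨ c.toNat = 50 ∨ c.toNat = 51 ∨ c.toNat = 52 ∨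
        c.toNat = 53 ∨ c.toNat = 54 ∨ c.toNat = 55 ∨ c.toNat = 56 ∨ c.toNat = 57 := by omega
    rcases h10 with h'|h'|h'|h'|h'|h'|h'|h'|h'|h' <;> rw [char_of_toNat h'] <;> decide
  · intro h
    fin_cases h <;> decide

lemma mem_pvWs_iff (c : Char) : c ∈ pvWs ↔ (c.toNat = 32 ∨ (9 ≤ c.toNat ∧ c.toNat ≤ 13)) := by
  constructor
  · intro h
    fin_cases h <;> simp
  · intro h
    have h6 : c.toNat = 32 ∨ c.toNat = 9 ∨ c.toNat = 10 ∨ c.toNat = 11 ∨ c.toNat = 12 ∨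
        c.toNat = 13 := by omega
    rcases h6 with h'|h'|h'|h'|h'|h' <;> rw [char_of_toNat h'] <;> decide

lemma ws_true {c : Char} (h : c ∈ pvWs) : PySem.Chars.isspace c = true := by
  fin_cases h <;> decide

lemma ws_false {c : Char} (hd : pvDomChar c = true) (h : c ∉ pvWs) :
    PySem.Chars.isspace c = false := by
  simp [pvDomChar] at hd
  rw [mem_pvWs_iff] at h
  simp [PySem.Chars.isspace]
  omega

lemma go_eq (cs : List Char) : ∀ cur acc,
    PySem.Chars.split₀.go cs cur acc = acc.reverse ++ tokensRef cs cur := by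
  induction cs with
  | nil =>
      intro cur acc
      simp [PySem.Chars.split₀.go, tokensRef]
      split_ifs <;> simp
  | cons c rest ih =>
      intro cur acc
      simp only [PySem.Chars.split₀.go, tokensRef]
      split_ifs with h1 h2 <;> simp [ih]

lemma filter_digits (t : List Char) :
    t.foldl (fun ret ss => if ss ∈ pvDigits then ret ++ [ss] else ret) [] = t.filter pvDig := by
  have h := PySem.List.foldl_append_ite_eq_filter (fun ss => ss ∈ pvDigits) t ([] : List Char)
  rw [h]
  simp only [List.nil_append]
  apply List.filter_congr
  intro x _
  rw [Bool.eq_iff_iff]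
  simp [dig_iff]

lemma trimNum_ofList (t : List Char) :
    trimNum (String.ofList t) = String.ofList (t.filter pvDig) := by
  simp [trimNum, filter_digits]

lemma foldA (ts : List (List Char)) : ∀ (l0 : List String),
    ts.foldl (fun l t =>
        if chkNumeric (String.ofList t) ≠ 0 then l ++ [trimNum (String.ofList t)] else l) l0
      = l0 ++ ts.flatMap emitTok := by
  induction ts with
  | nil => intro l0; simp
  | cons t rest ih =>
      intro l0
      simp only [List.foldl_cons, List.flatMap_cons, ih]
      have hbody : (if chkNumeric (String.ofList t) ≠ 0 then l0 ++ [trimNum (String.ofList t)]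
          else l0) = l0 ++ emitTok t := by
        simp only [chkNumeric, trimNum_ofList, emitTok]
        by_cases hE : (t.filter pvDig).isEmpty = true
        · have ht : t.filter pvDig = [] := by simpa [List.isEmpty_iff] using hE
          have h0 : PySem.Str.len (String.ofList (t.filter pvDig)) = 0 := by
            simp [ht, PySem.Str.len]
          rw [if_pos hE, h0]
          norm_num
        · have hne : t.filter pvDig ≠ [] := by simpa [List.isEmpty_iff] using hE
          have h1 : PySem.Str.len (String.ofList (t.filter pvDig)) ≥ 1 := by
            rcases List.exists_cons_of_ne_nil hne with ⟨a, u, hau⟩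
            simp [hau, PySem.Str.len]
          rw [if_neg hE, if_pos h1]
          norm_num
      rw [hbody, List.append_assoc]

lemma A_eq (s : String) :
    NumList s = (tokensRef s.toList []).flatMap emitTok := by
  show (((PySem.Chars.split₀ s.toList).map String.ofList).foldl _ []) = _
  rw [show PySem.Chars.split₀ s.toList = PySem.Chars.split₀.go s.toList [] [] from rfl, go_eq]
  simp only [List.reverse_nil, List.nil_append, List.foldl_map]
  rw [foldA]
  simp

lemma scanB (cs : List Char) : ∀ (cur : List Char) (out : List String),
    cs.all pvDomChar = true →
    ((cs ++ [' ']).foldl pvStep (out, cur.reverse.filter pvDig)).1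
      = out ++ (tokensRef cs cur).flatMap emitTok := by
  induction cs with
  | nil =>
      intro cur out _
      have hsp : (' ' : Char) ∈ pvWs := by decide
      simp only [List.nil_append, List.foldl_cons, List.foldl_nil, pvStep, if_pos hsp,
        tokensRef]
      by_cases hc : cur.isEmpty
      · simp_all [List.isEmpty_iff]
      · simp only [hc, if_neg, Bool.false_eq_true, not_false_iff, List.flatMap_cons,
          List.flatMap_nil, List.append_nil, emitTok]
        split_ifs <;> simp
  | cons c rest ih =>
      intro cur out hall
      simp only [List.all_cons, Bool.and_eq_true] at hall
      obtain ⟨hdc, hrest⟩ := hall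
      by_cases hw : c ∈ pvWs
      · have hsp := ws_true hw
        simp only [List.cons_append, List.foldl_cons, pvStep, if_pos hw]
        have h := ih [] (if (cur.reverse.filter pvDig).isEmpty then out
            else out ++ [String.ofList (cur.reverse.filter pvDig)]) hrest
        simp only [List.reverse_nil, List.filter_nil] at h
        rw [h]
        simp only [tokensRef, hsp, if_pos]
        by_cases hc : cur.isEmpty
        · have : cur = [] := by simpa [List.isEmpty_iff] using hc
          simp [this]
        · simp only [hc, Bool.false_eq_true, if_neg, not_false_iff, List.flatMap_cons, emitTok]
          split_ifs <;> simp
      · have hsp := ws_false hdc hw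
        by_cases hd : pvDig c = true
        · have hdp : ('0' ≤ c ∧ c ≤ '9') := by simpa [pvDig] using hd
          have hstep : pvStep (out, cur.reverse.filter pvDig) c
              = (out, cur.reverse.filter pvDig ++ [c]) := by
            simp [pvStep, hw, hdp]
          have hbuf : cur.reverse.filter pvDig ++ [c] = (c :: cur).reverse.filter pvDig := by
            simp [List.filter_append, hd]
          simp only [List.cons_append, List.foldl_cons, hstep, hbuf]
          rw [ih (c :: cur) out hrest]
          simp [tokensRef, hsp]
        · have hdp : ¬ ('0' ≤ c ∧ c ≤ '9') := by simpa [pvDig] using hd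
          have hstep : pvStep (out, cur.reverse.filter pvDig) c
              = (out, cur.reverse.filter pvDig) := by
            simp [pvStep, hw, hdp]
          have hbuf : cur.reverse.filter pvDig = (c :: cur).reverse.filter pvDig := by
            simp [List.filter_append, hd]
          simp only [List.cons_append, List.foldl_cons]
          rw [hstep, hbuf, ih (c :: cur) out hrest]
          simp [tokensRef, hsp]

-- ===== VERDICT (by name: the statement is the Claim_ definition above) =====
theorem NumList_spec : Claim_equal_NumList := by
  intro s hdom
  show NumList s = NumList_alt s
  rw [A_eq]
  have h := scanB s.toList [] [] hdom
  simpa [NumList_alt] using h.symm
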